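-- pv_equiv track=rewrite | github.com/areumsim/Lfactory-anomaly-explainer | experiments/metrics.py | _segments_from_preds
-- ===== SOURCE A (Python) =====
-- from typing import Dict, Iterable, Tuple
--
-- def _segments_from_preds(preds: Iterable[int]) -> list[tuple[int, int]]:
--     segs: list[tuple[int, int]] = []
--     start = -1
--     arr = [int(x) for x in preds]
--     for i, v in enumerate(arr):
--         if v == 1 and start == -1:
--             start = i
--         elif v == 0 and start != -1:
--             segs.append((start, i - 1))
--             start = -1
--     if start != -1:
--         segs.append((start, len(arr) - 1))
--     return segs
-- ===== SOURCE B (Python) =====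
-- from itertools import groupby
--
--
-- def _segments_from_preds(preds):
--     arr = [int(x) for x in preds]
--     # pass 1: forward-fill the run state into a boolean mask
--     mask = []
--     active = False
--     for v in arr:
--         if v == 1:
--             active = True
--         elif v == 0:
--             active = False
--         mask.append(active)
--     # pass 2: group maximal True runs of the mask into inclusive (start, end) pairs
--     segs = []
--     for key, grp in groupby(enumerate(mask), key=lambda t: t[1]):
--         if key:
--             g = list(grp)
--             segs.append((g[0][0], g[-1][0]))
--     return segs
-- ===== Notes on version B (the rewrite author's own statement) =====
-- stated objective: alternative
-- what changed: Replaces A's fused single-pass sentinel loop with two passes: forward-fill a boolean active mask over the input, then group maximal True runs of the mask (itertools.groupby) into inclusive (start,end) pairs.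
import Mathlib
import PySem

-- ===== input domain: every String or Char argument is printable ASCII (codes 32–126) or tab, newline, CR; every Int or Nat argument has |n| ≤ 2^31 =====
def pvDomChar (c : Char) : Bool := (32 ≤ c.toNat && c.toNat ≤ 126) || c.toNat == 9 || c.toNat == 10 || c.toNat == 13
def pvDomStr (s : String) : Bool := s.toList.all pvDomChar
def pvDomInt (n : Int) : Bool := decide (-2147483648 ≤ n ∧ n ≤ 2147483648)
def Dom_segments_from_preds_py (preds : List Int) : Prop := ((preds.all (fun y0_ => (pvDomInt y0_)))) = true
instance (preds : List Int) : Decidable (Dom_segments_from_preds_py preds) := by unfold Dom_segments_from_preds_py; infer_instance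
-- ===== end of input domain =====

-- B replaces A's fused single-pass sentinel loop by two passes (forward-filled Bool mask, then
-- grouping maximal True runs into inclusive (start,end) pairs); alternative decomposition, same cost.


-- ===== PORT A =====
-- A's for-loop over enumerate(arr) with state (segs, start), plus the final flush.
def pvLoopA : List Int → Int → Int → List (Int × Int) → List (Int × Int)
  | [], i, start, segs => if start ≠ -1 then segs ++ [(start, i - 1)] else segs
  | v :: rest, i, start, segs =>
      if v = 1 ∧ start = -1 then pvLoopA rest (i + 1) i segs
      else if v = 0 ∧ start ≠ -1 then pvLoopA rest (i + 1) (-1) (segs ++ [(start, i - 1)])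
      else pvLoopA rest (i + 1) start segs

def segments_from_preds_py (preds : List Int) : List (Int × Int) :=
  pvLoopA preds 0 (-1) []

-- ===== PORT B =====
-- pass 1: forward-fill the run state into a boolean mask
def pvFfill : List Int → Bool → List Bool
  | [], _ => []
  | v :: rest, active =>
      let a := if v = 1 then true else if v = 0 then false else active
      a :: pvFfill rest a

-- pass 2: group maximal True runs (groupby) into inclusive (start, end) pairs
def pvGroupSegs : List Bool → Int → List (Int × Int)
  | [], _ => []
  | false :: rest, i => pvGroupSegs rest (i + 1)
  | true :: rest, i =>
      let k := (rest.takeWhile (fun b => b = true)).length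
      (i, i + (k : Int)) :: pvGroupSegs (rest.drop k) (i + (k : Int) + 1)
termination_by m _ => m.length
decreasing_by all_goals simp [List.length_drop]

def segments_from_preds_py_alt (preds : List Int) : List (Int × Int) :=
  pvGroupSegs (pvFfill preds false) 0

-- ===== PRECONDITION & SPEC =====
def Spec_segments_from_preds_py (preds : List Int) (out : List (Int × Int)) : Prop := out = segments_from_preds_py_alt preds
instance (preds : List Int) (out : List (Int × Int)) : Decidable (Spec_segments_from_preds_py preds out) := by unfold Spec_segments_from_preds_py; infer_instance

-- ===== CLAIM (what is proved, stated in full; the proofs are below) =====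
def Claim_equal_segments_from_preds_py : Prop := ∀ (preds : List Int), Dom_segments_from_preds_py preds → Spec_segments_from_preds_py preds (segments_from_preds_py preds)

-- ===== LEMMAS AND PROOFS =====

theorem pvGroupSegs_nil (i : Int) : pvGroupSegs [] i = [] := by
  rw [pvGroupSegs]

theorem pvGroupSegs_false (m : List Bool) (i : Int) :
    pvGroupSegs (false :: m) i = pvGroupSegs m (i + 1) := by
  rw [pvGroupSegs]

theorem pvGroupSegs_true (m : List Bool) (i : Int) :
    pvGroupSegs (true :: m) i =
      (i, i + (((m.takeWhile (fun b => b = true)).length : Int))) ::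
        pvGroupSegs (m.drop (m.takeWhile (fun b => b = true)).length)
          (i + (((m.takeWhile (fun b => b = true)).length : Int)) + 1) := by
  rw [pvGroupSegs]

-- Joint invariant: with an inactive state A's loop equals grouping the false-seeded mask;
-- with a run open at s it emits (s, i + t - 1), t = leading-True run of the true-seeded mask,
-- then continues as grouping does.
theorem pvLoopA_invariant : ∀ (arr : List Int),
    (∀ (i : Int) (segs : List (Int × Int)), 0 ≤ i →
        pvLoopA arr i (-1) segs = segs ++ pvGroupSegs (pvFfill arr false) i) ∧
    (∀ (i s : Int) (segs : List (Int × Int)), 0 ≤ i → s ≠ -1 →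
        pvLoopA arr i s segs =
          segs ++ (s, i + (((pvFfill arr true).takeWhile (fun b => b = true)).length : Int) - 1) ::
            pvGroupSegs ((pvFfill arr true).drop ((pvFfill arr true).takeWhile (fun b => b = true)).length
              )
              (i + (((pvFfill arr true).takeWhile (fun b => b = true)).length : Int))) := by
  intro arr
  induction arr with
  | nil =>
      constructor
      · intro i segs _; simp [pvLoopA, pvFfill, pvGroupSegs_nil]
      · intro i s segs _ hs; simp [pvLoopA, pvFfill, pvGroupSegs_nil, hs]
  | cons v rest ih =>
      obtain ⟨ih0, ih1⟩ := ih
      constructor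
      · intro i segs hi
        by_cases hv1 : v = 1
        · -- a run opens at index i
          have hstep : pvLoopA (v :: rest) i (-1) segs = pvLoopA rest (i + 1) i segs := by
            simp [pvLoopA, hv1]
          have hmask : pvFfill (v :: rest) false = true :: pvFfill rest true := by
            simp [pvFfill, hv1]
          rw [hstep, ih1 (i + 1) i segs (by omega) (by omega), hmask, pvGroupSegs_true]
          generalize ((pvFfill rest true).takeWhile (fun b => b = true)).length = t
          have e1 : i + 1 + (t : Int) - 1 = i + (t : Int) := by omega
          have e2 : i + 1 + (t : Int) = i + (t : Int) + 1 := by omega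
          rw [e1, e2]
        · by_cases hv0 : v = 0
          · have hstep : pvLoopA (v :: rest) i (-1) segs = pvLoopA rest (i + 1) (-1) segs := by
              simp [pvLoopA, hv0]
            have hmask : pvFfill (v :: rest) false = false :: pvFfill rest false := by
              simp [pvFfill, hv0]
            rw [hstep, ih0 (i + 1) segs (by omega), hmask, pvGroupSegs_false]
          · have hstep : pvLoopA (v :: rest) i (-1) segs = pvLoopA rest (i + 1) (-1) segs := by
              simp [pvLoopA, hv1, hv0]
            have hmask : pvFfill (v :: rest) false = false :: pvFfill rest false := by
              simp [pvFfill, hv1, hv0]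
            rw [hstep, ih0 (i + 1) segs (by omega), hmask, pvGroupSegs_false]
      · intro i s segs hi hs
        by_cases hv0 : v = 0
        · -- the open run closes at index i - 1
          have hstep : pvLoopA (v :: rest) i s segs
              = pvLoopA rest (i + 1) (-1) (segs ++ [(s, i - 1)]) := by
            simp [pvLoopA, hv0, hs]
          have hmask : pvFfill (v :: rest) true = false :: pvFfill rest false := by
            simp [pvFfill, hv0]
          rw [hstep, ih0 (i + 1) (segs ++ [(s, i - 1)]) (by omega), hmask]
          simp [pvGroupSegs_false]
        · -- the mask stays True (v = 1 or a carried value)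
          have hstep : pvLoopA (v :: rest) i s segs = pvLoopA rest (i + 1) s segs := by
            by_cases hv1 : v = 1
            · simp [pvLoopA, hv1, hs]
            · simp [pvLoopA, hv1, hv0]
          have hmask : pvFfill (v :: rest) true = true :: pvFfill rest true := by
            by_cases hv1 : v = 1 <;> simp [pvFfill, hv0, hv1]
          rw [hstep, ih1 (i + 1) s segs (by omega) hs, hmask]
          simp only [List.takeWhile_cons, decide_true, if_true, List.length_cons,
            List.drop_succ_cons]
          generalize ((pvFfill rest true).takeWhile (fun b => b = true)).length = t
          push_cast
          have e1 : i + 1 + (t : Int) - 1 = i + ((t : Int) + 1) - 1 := by omega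
          have e2 : i + 1 + (t : Int) = i + ((t : Int) + 1) := by omega
          rw [e1, e2]

-- ===== VERDICT (by name: the statement is the Claim_ definition above) =====
theorem segments_from_preds_py_spec : Claim_equal_segments_from_preds_py := by
  intro preds _
  unfold Spec_segments_from_preds_py segments_from_preds_py segments_from_preds_py_alt
  simpa using (pvLoopA_invariant preds).1 0 [] (by omega)
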